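-- pv_equiv track=rewrite | github.com/Tarun-asati21/DSA-python-journey | 3591-check-if-any-element-has-prime-frequency/3591-check-if-any-element-has-prime-frequency.py | checkPrimeFrequency
-- ===== SOURCE A (Python) =====
-- from typing import List
--
-- def checkPrimeFrequency(nums: List[int]) -> bool:
--
--     # function to check prime
--     def isPrime(n):
--         if n < 2:
--             return False
--         for i in range(2, int(n**0.5) + 1):
--             if n % i == 0:
--                 return False
--         return True
--
--     # count frequency
--     freq = {}
--     for num in nums:
--         freq[num] = freq.get(num, 0) + 1
--
--     # check prime frequency
--     for value in freq.values():
--         if isPrime(value):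
--             return True
--
--     return False
-- ===== SOURCE B (Python) =====
-- from typing import List
--
-- def checkPrimeFrequency(nums: List[int]) -> bool:
--     # Count frequencies, then decide primality of every frequency with one
--     # precomputed Sieve of Eratosthenes instead of per-value trial division.
--     if not nums:
--         return False
--     freq = {}
--     for num in nums:
--         freq[num] = freq.get(num, 0) + 1
--     m = max(freq.values())
--     sieve = [False, False] + [True] * (m - 1)
--     for p in range(2, m + 1):
--         if sieve[p]:
--             for q in range(p * p, m + 1, p):
--                 sieve[q] = False
--     return any(sieve[c] for c in freq.values())
-- ===== Notes on version B (the rewrite author's own statement) =====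
-- stated objective: alternative
-- what changed: Per-frequency trial-division primality testing is replaced by one precomputed Sieve of Eratosthenes up to the maximum frequency, with the empty list handled by an early return.
import Mathlib
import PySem

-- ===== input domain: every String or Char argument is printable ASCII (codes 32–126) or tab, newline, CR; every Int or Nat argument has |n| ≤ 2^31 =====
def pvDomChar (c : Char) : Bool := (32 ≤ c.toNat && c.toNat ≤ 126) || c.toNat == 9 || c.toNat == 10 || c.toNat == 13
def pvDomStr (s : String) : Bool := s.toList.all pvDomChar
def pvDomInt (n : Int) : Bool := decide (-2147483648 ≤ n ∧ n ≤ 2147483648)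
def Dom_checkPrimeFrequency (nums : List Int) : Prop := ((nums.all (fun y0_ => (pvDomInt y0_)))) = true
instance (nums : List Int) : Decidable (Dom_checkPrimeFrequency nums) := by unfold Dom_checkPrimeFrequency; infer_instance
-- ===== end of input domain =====

-- B replaces A's per-frequency trial-division primality test by one precomputed Sieve of Eratosthenes
-- up to the maximum frequency (alternative decomposition; no speed claim).

-- ===== PORT A =====
-- Python's int(n**0.5): exact floor square root on the inputs reachable here (n is a frequency of a list element).
def pvIsPrimeA (n : Int) : Bool :=
  if n < 2 then false
  else !((PySem.List.pyRange 2 ((n.toNat.sqrt : Int) + 1) 1).any (fun i => PySem.Int.mod n i == 0))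

def checkPrimeFrequency (nums : List Int) : Bool :=
  let freq := nums.foldl (fun d x => d.insert x (d.getD x 0 + 1)) (PySem.Dict.empty : PySem.Dict Int Int)
  freq.values.any pvIsPrimeA

-- ===== PORT B =====
-- 'sieve[q] = False': q is nonnegative and in range here, so List.set at q.toNat is exact.
def checkPrimeFrequency_alt (nums : List Int) : Bool :=
  if nums = [] then false
  else
    let freq := nums.foldl (fun d x => d.insert x (d.getD x 0 + 1)) (PySem.Dict.empty : PySem.Dict Int Int)
    let m : Nat := ((PySem.List.max? freq.values (fun y => y)).getD 0).toNat
    let sieve0 : List Bool := [false, false] ++ List.replicate (m - 1) true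
    let sieve := (PySem.List.pyRange 2 ((m : Int) + 1) 1).foldl (fun s p =>
      if PySem.List.pyGetD s p false then
        (PySem.List.pyRange (p * p) ((m : Int) + 1) p).foldl (fun s q => s.set q.toNat false) s
      else s) sieve0
    freq.values.any (fun c => PySem.List.pyGetD sieve c false)

-- ===== PRECONDITION & SPEC =====
def Spec_checkPrimeFrequency (nums : List Int) (out : Bool) : Prop := out = checkPrimeFrequency_alt nums
instance (nums : List Int) (out : Bool) : Decidable (Spec_checkPrimeFrequency nums out) := by unfold Spec_checkPrimeFrequency; infer_instance

-- ===== CLAIM (what is proved, stated in full; the proofs are below) =====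
def Claim_equal_checkPrimeFrequency : Prop := ∀ (nums : List Int), Dom_checkPrimeFrequency nums → Spec_checkPrimeFrequency nums (checkPrimeFrequency nums)

-- ===== LEMMAS AND PROOFS =====

theorem pvIsPrimeA_eq (n : Int) (hn : 0 ≤ n) : pvIsPrimeA n = decide (Nat.Prime n.toNat) := by
  unfold pvIsPrimeA
  by_cases h2 : n < 2
  · have : ¬ Nat.Prime n.toNat := fun hp => by have := hp.two_le; omega
    simp [h2, this]
  · push Not at h2
    have hN : 2 ≤ n.toNat := by omega
    have hcast : (n.toNat : Int) = n := by omega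
    rw [if_neg (by omega)]
    have hiff : ((PySem.List.pyRange 2 ((n.toNat.sqrt : Int) + 1) 1).any
        (fun i => PySem.Int.mod n i == 0)) = true ↔ ¬ Nat.Prime n.toNat := by
      rw [List.any_eq_true]
      constructor
      · rintro ⟨i, hmem, hdv⟩
        rw [PySem.List.mem_pyRange_one] at hmem
        rw [beq_iff_eq, PySem.Int.mod_eq_zero_iff_dvd] at hdv
        intro hp
        rw [Nat.prime_def_le_sqrt] at hp
        refine hp.2 i.toNat (by omega) (by omega) ?_
        have hi : (i.toNat : Int) = i := by omega
        have : (i.toNat : Int) ∣ (n.toNat : Int) := by rw [hi, hcast]; exact hdv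
        exact_mod_cast this
      · intro hnp
        rw [Nat.prime_def_le_sqrt] at hnp
        push Not at hnp
        obtain ⟨q, hq2, hqs, hqd⟩ := hnp hN
        refine ⟨(q : Int), ?_, ?_⟩
        · rw [PySem.List.mem_pyRange_one]; constructor <;> omega
        · rw [beq_iff_eq, PySem.Int.mod_eq_zero_iff_dvd, ← hcast]
          exact_mod_cast hqd
    by_cases hp : Nat.Prime n.toNat
    · simp only [hp, decide_true] at hiff ⊢
      simp [← Bool.not_eq_true, hiff]
    · simp only [hp, decide_false] at hiff ⊢
      simp [hiff]

theorem pvFoldlSet_length (l : List Int) (s : List Bool) :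
    (l.foldl (fun s q => s.set q.toNat false) s).length = s.length := by
  induction l generalizing s with
  | nil => rfl
  | cons a t ih => simpa [List.foldl_cons] using ih (s.set a.toNat false)

theorem pvFoldlSet_getD (l : List Int) (hl : ∀ q ∈ l, 0 ≤ q) (s : List Bool) (j : Nat)
    (hj : j < s.length) :
    (l.foldl (fun s q => s.set q.toNat false) s).getD j false
      = if (j : Int) ∈ l then false else s.getD j false := by
  induction l generalizing s with
  | nil => simp
  | cons a t ih =>
    have ha : 0 ≤ a := hl a (List.mem_cons_self ..)
    rw [List.foldl_cons, ih (fun q hq => hl q (List.mem_cons_of_mem _ hq)) _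
        (by simpa using hj)]
    by_cases hmem : (j : Int) ∈ t
    · simp [hmem]
    · by_cases hja : (j : Int) = a
      · have : a.toNat = j := by omega
        simp [hja, this, List.getD_eq_getElem?_getD, hj]
      · have : a.toNat ≠ j := by omega
        simp [hmem, hja, List.getD_eq_getElem?_getD, this]

-- the sieve after the outer loop has run for p = 2 .. k-1
def pvSieve (m k : Nat) : List Bool :=
  (PySem.List.pyRange 2 (k : Int) 1).foldl (fun s p =>
      if PySem.List.pyGetD s p false then
        (PySem.List.pyRange (p * p) ((m : Int) + 1) p).foldl (fun s q => s.set q.toNat false) s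
      else s)
    ([false, false] ++ List.replicate (m - 1) true)

theorem pvStepFold_length (m : Nat) (l : List Int) (s : List Bool) :
    (l.foldl (fun s p =>
      if PySem.List.pyGetD s p false then
        (PySem.List.pyRange (p * p) ((m : Int) + 1) p).foldl (fun s q => s.set q.toNat false) s
      else s) s).length = s.length := by
  induction l generalizing s with
  | nil => rfl
  | cons a t ih =>
    rw [List.foldl_cons, ih]
    split
    · exact pvFoldlSet_length _ _
    · rfl

theorem pvSieve_length (m k : Nat) (hm : 1 ≤ m) : (pvSieve m k).length = m + 1 := by
  unfold pvSieve
  rw [pvStepFold_length]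
  simp
  omega

theorem pvSieve_succ (m k : Nat) (hk : 2 ≤ k) :
    pvSieve m (k + 1) = (if PySem.List.pyGetD (pvSieve m k) (k : Int) false then
        (PySem.List.pyRange ((k : Int) * (k : Int)) ((m : Int) + 1) (k : Int)).foldl
          (fun s q => s.set q.toNat false) (pvSieve m k)
      else pvSieve m k) := by
  unfold pvSieve
  rw [show ((k + 1 : Nat) : Int) = (k : Int) + 1 by push_cast; ring,
    PySem.List.pyRange_one_succ_right (by exact_mod_cast hk : (2:Int) ≤ (k:Int)), List.foldl_append]
  simp only [List.foldl_cons, List.foldl_nil]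

theorem pvPrime_char_lt (k : Nat) (h2 : 2 ≤ k) :
    ((∀ q, q < k → Nat.Prime q → ¬(q ∣ k ∧ q * q ≤ k)) ↔ Nat.Prime k) := by
  constructor
  · intro h
    by_contra hnp
    have hq : Nat.Prime k.minFac := Nat.minFac_prime (by omega)
    have hd : k.minFac ∣ k := Nat.minFac_dvd k
    have hsq : k.minFac * k.minFac ≤ k := by
      have := Nat.minFac_sq_le_self (by omega) hnp
      simpa [pow_two] using this
    have hlt : k.minFac < k := by
      rcases Nat.lt_or_ge k.minFac k with h | h
      · exact h
      · have : k.minFac = k := le_antisymm (Nat.minFac_le (by omega)) h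
        exact absurd (this ▸ hq) hnp
    exact h k.minFac hlt hq ⟨hd, hsq⟩
  · intro hp q hlt hq ⟨hdvd, _⟩
    rcases (Nat.Prime.eq_one_or_self_of_dvd hp q hdvd) with h | h
    · exact absurd h hq.ne_one
    · omega

theorem pvPrime_char (j : Nat) (h2 : 2 ≤ j) :
    ((∀ q, Nat.Prime q → ¬(q ∣ j ∧ q * q ≤ j)) ↔ Nat.Prime j) := by
  constructor
  · intro h
    by_contra hnp
    have hq : Nat.Prime j.minFac := Nat.minFac_prime (by omega)
    have hsq : j.minFac * j.minFac ≤ j := by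
      have := Nat.minFac_sq_le_self (by omega) hnp
      simpa [pow_two] using this
    exact h j.minFac hq ⟨Nat.minFac_dvd j, hsq⟩
  · intro hp q hq ⟨hdvd, hsq⟩
    rcases (Nat.Prime.eq_one_or_self_of_dvd hp q hdvd) with h | h
    · exact absurd h hq.ne_one
    · subst h; nlinarith [hq.two_le]

theorem pvSieve0_getD (m j : Nat) (hj : j ≤ m) :
    (([false, false] ++ List.replicate (m - 1) true : List Bool)).getD j false
      = decide (2 ≤ j) := by
  match j, hj with
  | 0, _ => rfl
  | 1, _ => rfl
  | (n+2), h =>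
    have hn : n < m - 1 := by omega
    simp [List.getD_eq_getElem?_getD, hn]

theorem pvSieve_getD (m : Nat) (hm : 1 ≤ m) (k : Nat) :
    k ≤ m + 1 → ∀ j, j ≤ m → (pvSieve m k).getD j false
      = decide (2 ≤ j ∧ ∀ q, q < k → Nat.Prime q → ¬(q ∣ j ∧ q * q ≤ j)) := by
  induction k with
  | zero =>
    intro hk j hj
    have : pvSieve m 0 = [false, false] ++ List.replicate (m - 1) true := by
      unfold pvSieve
      rw [PySem.List.pyRange_one_eq_nil (by omega)]; rfl
    rw [this, pvSieve0_getD m j hj]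
    have : (2 ≤ j ∧ ∀ q, q < 0 → Nat.Prime q → ¬(q ∣ j ∧ q * q ≤ j)) ↔ 2 ≤ j := by
      constructor
      · exact fun h => h.1
      · exact fun h => ⟨h, fun q hq _ _ => by omega⟩
    rw [eq_comm]; congr 1; apply propext; exact this
  | succ k ih =>
    intro hk j hj
    by_cases hk2 : k < 2
    · have : pvSieve m (k + 1) = [false, false] ++ List.replicate (m - 1) true := by
        unfold pvSieve
        rw [PySem.List.pyRange_one_eq_nil (by exact_mod_cast by omega)]; rfl
      rw [this, pvSieve0_getD m j hj]
      have hnoq : (2 ≤ j ∧ ∀ q, q < k + 1 → Nat.Prime q → ¬(q ∣ j ∧ q * q ≤ j)) ↔ 2 ≤ j := by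
        constructor
        · exact fun h => h.1
        · exact fun h => ⟨h, fun q hq hqp _ => by have := hqp.two_le; omega⟩
      rw [eq_comm]; congr 1; apply propext; exact hnoq
    · push Not at hk2
      have hkm : k ≤ m := by omega
      have ih' := ih (by omega)
      rw [pvSieve_succ m k hk2]
      have hguard : PySem.List.pyGetD (pvSieve m k) (k : Int) false = decide (Nat.Prime k) := by
        rw [PySem.List.pyGetD_natCast, ih' k hkm]
        congr 1
        apply propext
        constructor
        · rintro ⟨-, hall⟩; exact (pvPrime_char_lt k hk2).1 hall
        · intro hp; exact ⟨hk2, (pvPrime_char_lt k hk2).2 hp⟩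
      by_cases hp : Nat.Prime k
      · rw [hguard]
        simp only [hp, decide_true, if_true]
        have hmem0 : ∀ q ∈ PySem.List.pyRange ((k : Int) * k) ((m : Int) + 1) k, 0 ≤ q := by
          intro q hq
          rw [PySem.List.mem_pyRange_iff_of_pos (by exact_mod_cast by omega)] at hq
          nlinarith [hq.1]
        rw [pvFoldlSet_getD _ hmem0 _ j (by rw [pvSieve_length m k hm]; omega)]
        have hmem_iff : ((j : Int) ∈ PySem.List.pyRange ((k : Int) * k) ((m : Int) + 1) k)
            ↔ (k ∣ j ∧ k * k ≤ j) := by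
          rw [PySem.List.mem_pyRange_iff_of_pos (by exact_mod_cast by omega)]
          constructor
          · rintro ⟨h1, h2', h3⟩
            have hdvd : (k : Int) ∣ (j : Int) :=
              (dvd_sub_left (dvd_mul_right (k : Int) (k : Int))).1 h3
            exact ⟨by exact_mod_cast hdvd, by exact_mod_cast h1⟩
          · rintro ⟨h1, h2'⟩
            refine ⟨by exact_mod_cast h2', by omega, ?_⟩
            rw [dvd_sub_left (dvd_mul_right (k : Int) (k : Int))]
            exact_mod_cast h1
        by_cases hcond : (k ∣ j ∧ k * k ≤ j)
        · rw [if_pos (hmem_iff.2 hcond)]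
          symm
          rw [decide_eq_false_iff_not]
          rintro ⟨-, hall⟩
          exact hall k (by omega) hp hcond
        · rw [if_neg (fun h => hcond (hmem_iff.1 h)), ih' j hj]
          congr 1
          apply propext
          constructor
          · rintro ⟨h2j, hall⟩
            refine ⟨h2j, fun q hq hqp hqc => ?_⟩
            rcases Nat.lt_or_ge q k with h | h
            · exact hall q h hqp hqc
            · have : q = k := by omega
              exact hcond (this ▸ hqc)
          · rintro ⟨h2j, hall⟩
            exact ⟨h2j, fun q hq hqp hqc => hall q (by omega) hqp hqc⟩
      · rw [hguard]
        simp only [hp, decide_false, Bool.false_eq_true, if_false]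
        rw [ih' j hj]
        congr 1
        apply propext
        constructor
        · rintro ⟨h2j, hall⟩
          refine ⟨h2j, fun q hq hqp hqc => ?_⟩
          rcases Nat.lt_or_ge q k with h | h
          · exact hall q h hqp hqc
          · have : q = k := by omega
            exact hp (this ▸ hqp)
        · rintro ⟨h2j, hall⟩
          exact ⟨h2j, fun q hq hqp hqc => hall q (by omega) hqp hqc⟩

theorem pvSieve_prime (m : Nat) (hm : 1 ≤ m) (j : Nat) (h1 : 1 ≤ j) (hj : j ≤ m) :
    (pvSieve m (m + 1)).getD j false = decide (Nat.Prime j) := by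
  rw [pvSieve_getD m hm (m + 1) le_rfl j hj]
  by_cases h2 : 2 ≤ j
  · congr 1
    apply propext
    rw [← pvPrime_char j h2]
    constructor
    · rintro ⟨-, hall⟩ q hqp hqc
      have hql : q < m + 1 := by nlinarith [hqp.two_le, hqc.2]
      exact hall q hql hqp hqc
    · exact fun hall => ⟨h2, fun q _ hqp hqc => hall q hqp hqc⟩
  · have hj1 : j = 1 := by omega
    subst hj1
    simp [Nat.not_prime_one]

-- ===== VERDICT (by name: the statement is the Claim_ definition above) =====
theorem checkPrimeFrequency_spec : Claim_equal_checkPrimeFrequency := by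
  unfold Claim_equal_checkPrimeFrequency
  intro nums _
  unfold Spec_checkPrimeFrequency
  simp only [checkPrimeFrequency, checkPrimeFrequency_alt,
    PySem.Dict.foldl_insert_getD_add_one_eq_counter]
  by_cases hnil : nums = []
  · subst hnil; rfl
  · rw [if_neg hnil]
    have hvals : (PySem.Dict.counter nums).values
        = (PySem.Set.ofList nums).map (fun k => ((List.count k nums : Int))) := by
      have hv : (PySem.Dict.counter nums).values = (PySem.Dict.counter nums).items.map (·.2) := rfl
      rw [hv, PySem.Dict.items_counter, List.map_map]
      rfl
    have h1 : ∀ c ∈ (PySem.Dict.counter nums).values, 1 ≤ c := by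
      intro c hc
      rw [hvals, List.mem_map] at hc
      obtain ⟨k, hk, rfl⟩ := hc
      rw [PySem.Set.mem_ofList] at hk
      have : 0 < List.count k nums := List.count_pos_iff.2 hk
      omega
    have hvne : (PySem.Dict.counter nums).values ≠ [] := by
      rw [hvals]
      simp only [ne_eq, List.map_eq_nil_iff]
      intro h
      have := (PySem.Set.mem_ofList nums (nums.head hnil)).2 (List.head_mem hnil)
      simp [h] at this
    cases hmax : PySem.List.max? (PySem.Dict.counter nums).values (fun y => y) with
    | none => exact absurd ((PySem.List.max?_eq_none_iff _ _).1 hmax) hvne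
    | some m0 =>
      have hm0mem : m0 ∈ (PySem.Dict.counter nums).values := PySem.List.max?_mem hmax
      have hub : ∀ y ∈ (PySem.Dict.counter nums).values, y ≤ m0 := PySem.List.max?_isMax hmax
      have hm01 : 1 ≤ m0 := h1 m0 hm0mem
      have hm : 1 ≤ m0.toNat := by omega
      simp only [Option.getD_some]
      have hsieve : (PySem.List.pyRange 2 ((m0.toNat : Int) + 1) 1).foldl (fun s p =>
          if PySem.List.pyGetD s p false then
            (PySem.List.pyRange (p * p) ((m0.toNat : Int) + 1) p).foldl
              (fun s q => s.set q.toNat false) s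
          else s) ([false, false] ++ List.replicate (m0.toNat - 1) true)
          = pvSieve m0.toNat (m0.toNat + 1) := by
        unfold pvSieve
        rw [show (((m0.toNat + 1 : Nat)) : Int) = (m0.toNat : Int) + 1 by push_cast; ring]
      rw [hsieve]
      have key : ∀ c ∈ (PySem.Dict.counter nums).values,
          pvIsPrimeA c = PySem.List.pyGetD (pvSieve m0.toNat (m0.toNat + 1)) c false := by
        intro c hc
        have hc1 : 1 ≤ c := h1 c hc
        have hcm : c ≤ m0 := hub c hc
        have hcc : c = ((c.toNat : Int)) := by omega
        rw [pvIsPrimeA_eq c (by omega), hcc, PySem.List.pyGetD_natCast,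
          pvSieve_prime m0.toNat hm c.toNat (by omega) (by omega), Int.toNat_natCast]
      rw [Bool.eq_iff_iff, List.any_eq_true, List.any_eq_true]
      constructor
      · rintro ⟨c, hc, h⟩; exact ⟨c, hc, by rw [← key c hc]; exact h⟩
      · rintro ⟨c, hc, h⟩; exact ⟨c, hc, by rw [key c hc]; exact h⟩
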